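-- pv_equiv track=rewrite | github.com/CDBiddulph/scaffold-learning | experiments/keep_crosswords_20250711_195402/scaffolds/8-3-0/scaffold.py | determine_down_info
-- ===== SOURCE A (Python) =====
-- def determine_down_info(grid):
--     """Determine the length and position of each down clue"""
--     if not grid:
--         return {}
--
--     height = len(grid)
--     width = len(grid[0]) if height > 0 else 0
--     info = {}
--     current_num = 1
--
--     for row in range(height):
--         for col in range(width):
--             if grid[row][col] == ".":
--                 continue
--
--             # Check if this position starts an across word
--             starts_across = (
--                 (col == 0 or grid[row][col - 1] == ".")
--                 and col + 1 < width
--                 and grid[row][col + 1] != "."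
--             )
--
--             # Check if this position starts a down word
--             starts_down = (
--                 (row == 0 or grid[row - 1][col] == ".")
--                 and row + 1 < height
--                 and grid[row + 1][col] != "."
--             )
--
--             if starts_across or starts_down:
--                 if starts_down:
--                     # Calculate length of down word
--                     length = 0
--                     for r in range(row, height):
--                         if grid[r][col] == ".":
--                             break
--                         length += 1
--                     info[current_num] = {'length': length, 'row': row, 'col': col}
--                 current_num += 1
--
--     return info
-- ===== SOURCE B (Python) =====
-- def determine_down_info(grid):
--     """Determine the length and position of each down clue"""
--     if not grid:
--         return {}
--     height = len(grid)
--     width = len(grid[0])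
--
--     # Phase 1: row-major numbering pass; remember each numbered down start.
--     down_starts = []
--     num = 1
--     for r, row in enumerate(grid):
--         for c in range(width):
--             if row[c] == ".":
--                 continue
--             across = (c == 0 or row[c - 1] == ".") and c + 1 < width and row[c + 1] != "."
--             down = (r == 0 or grid[r - 1][c] == ".") and r + 1 < height and grid[r + 1][c] != "."
--             if down:
--                 down_starts.append((num, r, c))
--             if across or down:
--                 num += 1
--
--     # Phase 2: column-major pass; record the length of every vertical run at its top cell.
--     run_len = {}
--     for c in range(width):
--         top = 0
--         for r in range(height):
--             if grid[r][c] == ".":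
--                 if r > top:
--                     run_len[(top, c)] = r - top
--                 top = r + 1
--         if top < height:
--             run_len[(top, c)] = height - top
--
--     return {n: {'length': run_len[(r, c)], 'row': r, 'col': c} for n, r, c in down_starts}
-- ===== Notes on version B (the rewrite author's own statement) =====
-- stated objective: alternative
-- what changed: B splits A's single numbering loop with an inline downward length scan into two separate phases: a row-major numbering pass that only records the list of numbered down-start cells, and an independent column-major pass that detects each vertical run in one forward sweep (tracking the current run top) and stores its length in a (row,col)-keyed dict; the result dict is then assembled from the down-start list by dict lookup.
import Mathlib
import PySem

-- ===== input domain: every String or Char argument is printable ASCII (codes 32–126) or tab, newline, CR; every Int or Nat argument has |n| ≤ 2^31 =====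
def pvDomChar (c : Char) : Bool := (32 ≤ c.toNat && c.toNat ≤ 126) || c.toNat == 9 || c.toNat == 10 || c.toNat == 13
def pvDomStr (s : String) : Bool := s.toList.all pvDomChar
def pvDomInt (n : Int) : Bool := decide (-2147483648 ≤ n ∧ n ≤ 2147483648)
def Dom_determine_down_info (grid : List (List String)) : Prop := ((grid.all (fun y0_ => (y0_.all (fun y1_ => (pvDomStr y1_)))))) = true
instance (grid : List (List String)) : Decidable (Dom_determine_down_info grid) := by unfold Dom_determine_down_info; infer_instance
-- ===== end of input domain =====

-- B splits A's single numbering loop (with its inline downward rescan per down start) into a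
-- row-major numbering pass recording down-start cells plus an independent column-major run-length
-- sweep; same exact result (alternative decomposition, no speed claim).

-- grid[r][c] as a total lookup; inside Pre_ every access the programs make is in range, so the defaults are never read.
def ddCell (grid : List (List String)) (r c : Nat) : String :=
  (grid.getD r []).getD c ""

-- ===== PORT A =====
-- A's inner loop "for r in range(row, height): if grid[r][col] == '.': break; length += 1", fuel = height - row.
def ddLenA (grid : List (List String)) (c : Nat) : Nat → Nat → Nat
  | _, 0 => 0
  | r, fuel+1 => if ddCell grid r c = "." then 0 else ddLenA grid c (r+1) fuel + 1

-- the body of A's nested loop, acting on the state (info, current_num)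
def ddStepA (grid : List (List String)) (height width : Nat)
    (st : PySem.Dict Int (List (String × Int)) × Int) (r c : Nat) :
    PySem.Dict Int (List (String × Int)) × Int :=
  if ddCell grid r c = "." then st
  else
    let sa := (c == 0 || ddCell grid r (c-1) == ".") && decide (c+1 < width) && !(ddCell grid r (c+1) == ".")
    let sd := (r == 0 || ddCell grid (r-1) c == ".") && decide (r+1 < height) && !(ddCell grid (r+1) c == ".")
    if sa || sd then
      (if sd then
         st.1.insert st.2 [("length", (ddLenA grid c r (height - r) : Int)), ("row", (r : Int)), ("col", (c : Int))]
       else st.1,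
       st.2 + 1)
    else st

def determine_down_info (grid : List (List String)) : List (Int × List (String × Int)) :=
  if grid.isEmpty then [] else
    (((List.range grid.length).foldl
        (fun st r => (List.range (grid.headD []).length).foldl
          (fun st c => ddStepA grid grid.length (grid.headD []).length st r c) st)
        (PySem.Dict.empty, (1 : Int))).1).items

-- ===== PORT B =====
-- phase-1 cell body: "for r, row in enumerate(grid)" carries (row, r); state (down_starts, num)
def bP1Step (grid : List (List String)) (height width : Nat) (rw : List String × Nat)
    (st : List (Int × Nat × Nat) × Int) (c : Nat) : List (Int × Nat × Nat) × Int :=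
  if rw.1.getD c "" = "." then st
  else
    let across := (c == 0 || rw.1.getD (c-1) "" == ".") && decide (c+1 < width) && !(rw.1.getD (c+1) "" == ".")
    let down := (rw.2 == 0 || ddCell grid (rw.2-1) c == ".") && decide (rw.2+1 < height) && !(ddCell grid (rw.2+1) c == ".")
    ((if down then st.1 ++ [(st.2, rw.2, c)] else st.1),
     if across || down then st.2 + 1 else st.2)

def bPhase1 (grid : List (List String)) (height width : Nat) : List (Int × Nat × Nat) × Int :=
  grid.zipIdx.foldl
    (fun st rw => (List.range width).foldl (bP1Step grid height width rw) st) ([], 1)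

-- phase-2 column body: "if grid[r][c] == '.': (if r > top: record the finished run) ; top = r + 1"
def bColStep (grid : List (List String)) (c : Nat)
    (st : Nat × PySem.Dict (Int × Int) Int) (r : Nat) : Nat × PySem.Dict (Int × Int) Int :=
  if ddCell grid r c = "." then
    (r + 1, if decide (st.1 < r) then st.2.insert ((st.1 : Int), (c : Int)) ((r : Int) - (st.1 : Int)) else st.2)
  else st

-- the trailing "if top < height: record the last run" of a column
def bColFin (height c : Nat) (st : Nat × PySem.Dict (Int × Int) Int) : PySem.Dict (Int × Int) Int :=
  if decide (st.1 < height) then st.2.insert ((st.1 : Int), (c : Int)) ((height : Int) - (st.1 : Int)) else st.2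

def bColScan (grid : List (List String)) (height c : Nat)
    (d : PySem.Dict (Int × Int) Int) : PySem.Dict (Int × Int) Int :=
  bColFin height c ((List.range height).foldl (bColStep grid c) (0, d))

def bRunLen (grid : List (List String)) (height width : Nat) : PySem.Dict (Int × Int) Int :=
  (List.range width).foldl (fun d c => bColScan grid height c d) PySem.Dict.empty

-- final dict comprehension: run_len[(r, c)] is a lookup; the key is always present on Pre_
-- inputs (every numbered down start is the top of a vertical run), so getD's default is never read.
def bIns (rl : PySem.Dict (Int × Int) Int)
    (info : PySem.Dict Int (List (String × Int))) (x : Int × Nat × Nat) :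
    PySem.Dict Int (List (String × Int)) :=
  info.insert x.1
    [("length", (rl.get? ((x.2.1 : Int), (x.2.2 : Int))).getD 0),
     ("row", (x.2.1 : Int)), ("col", (x.2.2 : Int))]

def determine_down_info_alt (grid : List (List String)) : List (Int × List (String × Int)) :=
  if grid.isEmpty then [] else
    ((((bPhase1 grid grid.length (grid.headD []).length).1).foldl
        (bIns (bRunLen grid grid.length (grid.headD []).length)) PySem.Dict.empty)).items

-- ===== PRECONDITION & SPEC =====
-- Pre_ excludes exactly the ragged grids on which A raises IndexError: some row shorter than len(grid[0]).
def Pre_determine_down_info (grid : List (List String)) : Prop :=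
  ∀ row ∈ grid, (grid.headD []).length ≤ row.length
instance (grid : List (List String)) : Decidable (Pre_determine_down_info grid) := by
  unfold Pre_determine_down_info; infer_instance

def pvWitness_determine_down_info : List (List String) := [["A", "B"], ["C", "."]]

def Spec_determine_down_info (grid : List (List String)) (out : List (Int × List (String × Int))) : Prop := out = determine_down_info_alt grid
instance (grid : List (List String)) (out : List (Int × List (String × Int))) : Decidable (Spec_determine_down_info grid out) := by unfold Spec_determine_down_info; infer_instance

-- ===== CLAIM (what is proved, stated in full; the proofs are below) =====
def Claim_equal_determine_down_info : Prop := ∀ (grid : List (List String)), Dom_determine_down_info grid → Pre_determine_down_info grid → Spec_determine_down_info grid (determine_down_info grid)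

-- ===== LEMMAS AND PROOFS =====

-- generic fold lemmas
lemma ddFoldRel {α β γ : Type} (R : α → β → Prop) (f : α → γ → α) (g : β → γ → β)
    (l : List γ) (h : ∀ a b c, c ∈ l → R a b → R (f a c) (g b c)) :
    ∀ a b, R a b → R (l.foldl f a) (l.foldl g b) := by
  induction l with
  | nil => intro a b hab; exact hab
  | cons x t ih =>
    intro a b hab
    exact ih (fun a b c hc => h a b c (List.mem_cons_of_mem _ hc)) _ _
      (h a b x (List.mem_cons_self) hab)

lemma ddFoldInv {α γ : Type} (Q : α → Prop) (f : α → γ → α) (l : List γ)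
    (h : ∀ a x, x ∈ l → Q a → Q (f a x)) : ∀ a, Q a → Q (l.foldl f a) := by
  induction l with
  | nil => intro a ha; exact ha
  | cons x t ih =>
    intro a ha
    exact ih (fun a x hx => h a x (List.mem_cons_of_mem _ hx)) _
      (h a x (List.mem_cons_self) ha)

lemma ddKeyNe (a b a' b' : Nat) (h : a ≠ a' ∨ b ≠ b') :
    ¬(((a : Int), (b : Int)) = ((a' : Int), (b' : Int))) := by
  intro he
  rw [Prod.ext_iff] at he
  rcases h with h | h <;> [skip; skip] <;>
    · obtain ⟨h1, h2⟩ := he; omega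

-- A's dict state expressed as a fold over B's phase-1 down-start list
def ddAIns (grid : List (List String)) (height : Nat)
    (d : PySem.Dict Int (List (String × Int))) (x : Int × Nat × Nat) :
    PySem.Dict Int (List (String × Int)) :=
  d.insert x.1 [("length", (ddLenA grid x.2.2 x.2.1 (height - x.2.1) : Int)),
                ("row", (x.2.1 : Int)), ("col", (x.2.2 : Int))]

lemma ddStep_pair (grid : List (List String)) (height width r c : Nat)
    (a : PySem.Dict Int (List (String × Int)) × Int) (b : List (Int × Nat × Nat) × Int)
    (hab : a.1 = b.1.foldl (ddAIns grid height) PySem.Dict.empty ∧ a.2 = b.2) :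
    (ddStepA grid height width a r c).1
      = (bP1Step grid height width (grid.getD r [], r) b c).1.foldl (ddAIns grid height) PySem.Dict.empty
    ∧ (ddStepA grid height width a r c).2 = (bP1Step grid height width (grid.getD r [], r) b c).2 := by
  obtain ⟨h1, h2⟩ := hab
  simp only [ddStepA, bP1Step, ddCell]
  by_cases h0 : (grid.getD r []).getD c "" = "."
  · simp only [if_pos h0]; exact ⟨h1, h2⟩
  · simp only [if_neg h0]
    split_ifs <;> simp_all [List.foldl_append, ddAIns]

lemma zipIdx_eq_map_range {α : Type} (l : List α) (dflt : α) :
    l.zipIdx = (List.range l.length).map (fun r => (l.getD r dflt, r)) := by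
  apply List.ext_getElem
  · simp
  · intro i h1 h2
    have hi : i < l.length := by simpa using h1
    simp [List.getElem_zipIdx, hi]

lemma ddPhase_pair (grid : List (List String)) (width : Nat) :
    ((List.range grid.length).foldl
        (fun st r => (List.range width).foldl
          (fun st c => ddStepA grid grid.length width st r c) st)
        (PySem.Dict.empty, (1 : Int))).1
      = ((bPhase1 grid grid.length width).1).foldl (ddAIns grid grid.length) PySem.Dict.empty := by
  unfold bPhase1
  rw [zipIdx_eq_map_range grid [], List.foldl_map]
  have := ddFoldRel
    (fun (a : PySem.Dict Int (List (String × Int)) × Int) (b : List (Int × Nat × Nat) × Int) =>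
      a.1 = b.1.foldl (ddAIns grid grid.length) PySem.Dict.empty ∧ a.2 = b.2)
    (fun st r => (List.range width).foldl (fun st c => ddStepA grid grid.length width st r c) st)
    (fun st r => (List.range width).foldl (bP1Step grid grid.length width (grid.getD r [], r)) st)
    (List.range grid.length)
    (fun a b r _ hab =>
      ddFoldRel _ _ _ (List.range width)
        (fun a b c _ hab => ddStep_pair grid grid.length width r c a b hab) a b hab)
    (PySem.Dict.empty, (1 : Int)) ([], 1) ⟨by simp, rfl⟩
  exact this.1

-- every recorded down start satisfies the down-start condition
def ddP (grid : List (List String)) (height width : Nat) (x : Int × Nat × Nat) : Prop :=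
  x.2.1 + 1 < height ∧ x.2.2 < width ∧ ddCell grid x.2.1 x.2.2 ≠ "." ∧
  (x.2.1 = 0 ∨ ddCell grid (x.2.1 - 1) x.2.2 = ".") ∧ ddCell grid (x.2.1 + 1) x.2.2 ≠ "."

lemma ddPhase1_prop (grid : List (List String)) (height width : Nat) :
    ∀ x ∈ (bPhase1 grid height width).1, ddP grid height width x := by
  unfold bPhase1
  rw [zipIdx_eq_map_range grid [], List.foldl_map]
  refine ddFoldInv (fun (st : List (Int × Nat × Nat) × Int) => ∀ x ∈ st.1, ddP grid height width x)
    _ (List.range grid.length) ?_ ([], 1) (by simp)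
  intro st r _ hst
  refine ddFoldInv (fun (st : List (Int × Nat × Nat) × Int) => ∀ x ∈ st.1, ddP grid height width x)
    _ (List.range width) ?_ st hst
  intro st c hc hstQ
  have hcw : c < width := List.mem_range.mp hc
  simp only [bP1Step]
  by_cases h0 : ((grid.getD r [], r) : List String × Nat).1.getD c "" = "."
  · simp only [if_pos h0]; exact hstQ
  · simp only [if_neg h0]
    by_cases hdown : ((((grid.getD r [], r) : List String × Nat).2 == 0 || ddCell grid (((grid.getD r [], r) : List String × Nat).2-1) c == ".") && decide (((grid.getD r [], r) : List String × Nat).2+1 < height) && !(ddCell grid (((grid.getD r [], r) : List String × Nat).2+1) c == ".")) = true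
    · simp only [if_pos hdown]
      intro x hx
      rcases List.mem_append.mp hx with hx | hx
      · exact hstQ x hx
      · have hx' : x = (st.2, r, c) := by simpa using hx
        subst hx'
        simp only [Bool.and_eq_true, Bool.or_eq_true, beq_iff_eq, decide_eq_true_eq,
          Bool.not_eq_true', beq_eq_false_iff_ne] at hdown
        refine ⟨hdown.1.2, hcw, ?_, ?_, hdown.2⟩
        · simpa [ddCell] using h0
        · exact hdown.1.1
    · simp only [if_neg hdown]
      intro x hx
      exact hstQ x hx

-- ddLenA characterization
lemma ddLenA_le (grid : List (List String)) (c : Nat) :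
    ∀ fuel r, ddLenA grid c r fuel ≤ fuel := by
  intro fuel
  induction fuel with
  | zero => intro r; simp [ddLenA]
  | succ n ih =>
    intro r
    unfold ddLenA
    split_ifs with h
    · omega
    · have := ih (r+1); omega

lemma ddLenA_nonDot (grid : List (List String)) (c : Nat) :
    ∀ fuel r k, k < ddLenA grid c r fuel → ddCell grid (r + k) c ≠ "." := by
  intro fuel
  induction fuel with
  | zero => intro r k hk; simp [ddLenA] at hk
  | succ n ih =>
    intro r k hk
    unfold ddLenA at hk
    split_ifs at hk with h
    · omega
    · match k with
      | 0 => simpa using h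
      | k+1 =>
        have := ih (r+1) k (by omega)
        have heq : r + (k+1) = (r+1) + k := by omega
        rw [heq]; exact this

lemma ddLenA_end (grid : List (List String)) (c : Nat) :
    ∀ fuel r, ddLenA grid c r fuel = fuel ∨ ddCell grid (r + ddLenA grid c r fuel) c = "." := by
  intro fuel
  induction fuel with
  | zero => intro r; left; simp [ddLenA]
  | succ n ih =>
    intro r
    unfold ddLenA
    split_ifs with h
    · right; simpa using h
    · rcases ih (r+1) with h1 | h1
      · left; omega
      · right
        have heq : r + (ddLenA grid c (r+1) n + 1) = (r+1) + ddLenA grid c (r+1) n := by omega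
        rw [heq]; exact h1

-- phase-2 fold facts
lemma ddReach (grid : List (List String)) (c r0 : Nat)
    (htop : r0 = 0 ∨ ddCell grid (r0-1) c = ".") (d0 : PySem.Dict (Int × Int) Int) :
    ∃ d1, (List.range r0).foldl (bColStep grid c) (0, d0) = (r0, d1) := by
  cases r0 with
  | zero => exact ⟨d0, rfl⟩
  | succ m =>
    have hdot : ddCell grid m c = "." := by
      rcases htop with h | h
      · omega
      · simpa using h
    rw [List.range_succ, List.foldl_append]
    simp only [List.foldl_cons, List.foldl_nil]
    unfold bColStep
    rw [if_pos hdot]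
    exact ⟨_, rfl⟩

lemma ddRun (grid : List (List String)) (c r0 : Nat) (d1 : PySem.Dict (Int × Int) Int) :
    ∀ k, (∀ j, j < k → ddCell grid (r0+j) c ≠ ".") →
      ((List.range k).map (r0 + ·)).foldl (bColStep grid c) (r0, d1) = (r0, d1) := by
  intro k
  induction k with
  | zero => intro _; simp
  | succ n ih =>
    intro h
    rw [List.range_succ, List.map_append, List.foldl_append, ih (fun j hj => h j (by omega))]
    simp only [List.map_cons, List.map_nil, List.foldl_cons, List.foldl_nil]
    unfold bColStep
    rw [if_neg (h n (by omega))]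

lemma ddColMain (grid : List (List String)) (height c0 r0 : Nat)
    (d0 : PySem.Dict (Int × Int) Int)
    (hr : r0 < height) (hnd : ddCell grid r0 c0 ≠ ".")
    (htop : r0 = 0 ∨ ddCell grid (r0-1) c0 = ".") :
    (bColScan grid height c0 d0).get? ((r0 : Int), (c0 : Int))
      = some ((ddLenA grid c0 r0 (height - r0) : Nat) : Int) := by
  set L := ddLenA grid c0 r0 (height - r0) with hL
  have hL1 : 1 ≤ L := by
    have hfuel : height - r0 = (height - r0 - 1) + 1 := by omega
    have h2 : L = ddLenA grid c0 r0 ((height - r0 - 1) + 1) := by rw [hL, ← hfuel]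
    rw [h2, show ddLenA grid c0 r0 ((height - r0 - 1) + 1)
      = if ddCell grid r0 c0 = "." then 0 else ddLenA grid c0 (r0+1) (height - r0 - 1) + 1 from rfl]
    rw [if_neg hnd]; omega
  have hle : L ≤ height - r0 := by rw [hL]; exact ddLenA_le grid c0 _ r0
  obtain ⟨d1, hd1⟩ := ddReach grid c0 r0 htop d0
  have hnonDot : ∀ j, j < L → ddCell grid (r0+j) c0 ≠ "." := by
    intro j hj
    exact ddLenA_nonDot grid c0 (height - r0) r0 j (by rw [← hL]; exact hj)
  unfold bColScan
  rcases (by omega : r0 + L = height ∨ r0 + L < height) with hA | hB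
  · have hsplit : List.range height = List.range r0 ++ (List.range L).map (r0 + ·) := by
      rw [← hA, List.range_add]
    rw [hsplit, List.foldl_append, hd1, ddRun grid c0 r0 d1 L hnonDot]
    unfold bColFin
    rw [if_pos (by simpa using hr)]
    rw [PySem.Dict.get?_insert_self]
    have hv : (height : Int) - (r0 : Nat) = (L : Int) := by omega
    rw [hv]
  · have hdot : ddCell grid (r0 + L) c0 = "." := by
      rcases ddLenA_end grid c0 (height - r0) r0 with h | h
      · rw [← hL] at h; omega
      · rw [← hL] at h; exact h
    have hsplit : List.range height
        = ((List.range r0 ++ (List.range L).map (r0 + ·)) ++ [r0 + L])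
          ++ (List.range (height - (r0+L+1))).map ((r0+L+1) + ·) := by
      have h1 : height = (r0+L+1) + (height - (r0+L+1)) := by omega
      conv_lhs => rw [h1]
      rw [List.range_add]
      congr 1
      rw [show r0+L+1 = (r0+L)+1 from rfl, List.range_succ, List.range_add]
    have hstep : bColStep grid c0 (r0, d1) (r0+L)
        = (r0+L+1, d1.insert ((r0 : Int), (c0 : Int)) (L : Int)) := by
      unfold bColStep
      rw [if_pos hdot, if_pos (by simp; omega)]
      have hv : ((r0+L : Nat) : Int) - ((r0 : Nat) : Int) = (L : Int) := by push_cast; ring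
      rw [hv]
    have hfold : (List.range height).foldl (bColStep grid c0) (0, d0)
        = ((List.range (height - (r0+L+1))).map ((r0+L+1) + ·)).foldl (bColStep grid c0)
            (r0+L+1, d1.insert ((r0 : Int), (c0 : Int)) (L : Int)) := by
      rw [hsplit, List.foldl_append, List.foldl_append, List.foldl_append, hd1,
        ddRun grid c0 r0 d1 L hnonDot]
      simp only [List.foldl_cons, List.foldl_nil]
      rw [hstep]
    rw [hfold]
    have hQ := ddFoldInv
      (fun (st : Nat × PySem.Dict (Int × Int) Int) =>
        r0 < st.1 ∧ st.2.get? ((r0 : Int), (c0 : Int)) = some (L : Int))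
      (bColStep grid c0) ((List.range (height - (r0+L+1))).map ((r0+L+1) + ·))
      ?_ (r0+L+1, d1.insert ((r0 : Int), (c0 : Int)) (L : Int))
      ⟨by omega, by rw [PySem.Dict.get?_insert_self]⟩
    · set stf := ((List.range (height - (r0+L+1))).map ((r0+L+1) + ·)).foldl (bColStep grid c0)
        (r0+L+1, d1.insert ((r0 : Int), (c0 : Int)) (L : Int)) with hstf
      obtain ⟨hq1, hq2⟩ := hQ
      unfold bColFin
      split_ifs with hfin
      · rw [PySem.Dict.get?_insert_of_ne _ _ (ddKeyNe r0 c0 stf.1 c0 (Or.inl (by omega)))]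
        exact hq2
      · exact hq2
    · intro st x hx hq
      obtain ⟨j, _, hj⟩ := List.mem_map.mp hx
      obtain ⟨hq1, hq2⟩ := hq
      unfold bColStep
      split_ifs with h1 h2
      · refine ⟨by omega, ?_⟩
        rw [PySem.Dict.get?_insert_of_ne _ _ (ddKeyNe r0 c0 st.1 c0 (Or.inl (by omega)))]
        exact hq2
      · exact ⟨by omega, hq2⟩
      · exact ⟨hq1, hq2⟩

lemma ddColOther (grid : List (List String)) (height c c0 r0 : Nat) (hne : c ≠ c0)
    (d : PySem.Dict (Int × Int) Int) :
    (bColScan grid height c d).get? ((r0 : Int), (c0 : Int))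
      = d.get? ((r0 : Int), (c0 : Int)) := by
  unfold bColScan
  have hQ := ddFoldInv
    (fun (st : Nat × PySem.Dict (Int × Int) Int) =>
      st.2.get? ((r0 : Int), (c0 : Int)) = d.get? ((r0 : Int), (c0 : Int)))
    (bColStep grid c) (List.range height)
    ?_ (0, d) rfl
  · set stf := (List.range height).foldl (bColStep grid c) (0, d) with hstf
    unfold bColFin
    split_ifs with hfin
    · rw [PySem.Dict.get?_insert_of_ne _ _ (ddKeyNe r0 c0 stf.1 c (Or.inr (Ne.symm hne)))]
      exact hQ
    · exact hQ
  · intro st x _ hq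
    unfold bColStep
    split_ifs with h1 h2
    · rw [PySem.Dict.get?_insert_of_ne _ _ (ddKeyNe r0 c0 st.1 c (Or.inr (Ne.symm hne)))]
      exact hq
    · exact hq
    · exact hq

-- the run-length dict lookup
lemma ddRunLen_lookup (grid : List (List String)) (height width r0 c0 : Nat)
    (hr : r0 < height) (hc : c0 < width)
    (hnd : ddCell grid r0 c0 ≠ ".")
    (htop : r0 = 0 ∨ ddCell grid (r0 - 1) c0 = ".") :
    (bRunLen grid height width).get? ((r0 : Int), (c0 : Int))
      = some ((ddLenA grid c0 r0 (height - r0) : Nat) : Int) := by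
  unfold bRunLen
  have hw : List.range width
      = (List.range c0 ++ [c0]) ++ (List.range (width - (c0+1))).map ((c0+1) + ·) := by
    have h1 : width = (c0+1) + (width - (c0+1)) := by omega
    conv_lhs => rw [h1]
    rw [List.range_add, List.range_succ]
  rw [hw, List.foldl_append, List.foldl_append]
  simp only [List.foldl_cons, List.foldl_nil]
  refine ddFoldInv
    (fun (d : PySem.Dict (Int × Int) Int) =>
      d.get? ((r0 : Int), (c0 : Int)) = some ((ddLenA grid c0 r0 (height - r0) : Nat) : Int))
    (fun d c => bColScan grid height c d)
    ((List.range (width - (c0+1))).map ((c0+1) + ·)) ?_ _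
    (ddColMain grid height c0 r0 _ hr hnd htop)
  intro d x hx hq
  obtain ⟨j, _, hj⟩ := List.mem_map.mp hx
  rw [ddColOther grid height x c0 r0 (by omega) d]
  exact hq

-- ===== VERDICT (by name: the statement is the Claim_ definition above) =====
theorem determine_down_info_spec : Claim_equal_determine_down_info := by
  intro grid _ _
  unfold Spec_determine_down_info determine_down_info determine_down_info_alt
  by_cases hempty : grid.isEmpty
  · simp [hempty]
  · simp only [hempty, Bool.false_eq_true, if_false]
    congr 1
    rw [ddPhase_pair grid (grid.headD []).length]
    apply PySem.List.foldl_congr_mem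
    intro acc x hx
    have hP := ddPhase1_prop grid grid.length (grid.headD []).length x hx
    obtain ⟨h1, h2, h3, h4, h5⟩ := hP
    unfold ddAIns bIns
    rw [ddRunLen_lookup grid grid.length (grid.headD []).length x.2.1 x.2.2
      (by omega) h2 h3 h4]
    rfl
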